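-- pv_equiv track=rewrite | github.com/rus1anc0der/Python-Training-Course | lesson3/main.py | item1
-- ===== SOURCE A (Python) =====
-- def item1(dict_values: dict) -> set:
--     result: set = set()
--     for i in dict_values.values():
--         result = set(i)
--         for k in dict_values.values():
--             result &= set(k)
--         break
--     return result
-- ===== SOURCE B (Python) =====
-- def item1(dict_values: dict) -> set:
--     n = len(dict_values)
--     if n == 0:
--         return set()
--     counts = {}
--     for v in dict_values.values():
--         for x in set(v):
--             counts[x] = counts.get(x, 0) + 1
--     return {x for x in counts if counts.get(x, 0) == n}
-- ===== Notes on version B (the rewrite author's own statement) =====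
-- stated objective: alternative
-- what changed: Replaces A's repeated set-&-intersection over all dict values with a single frequency table: count in how many values each element occurs (distinct per value) and keep the elements whose count equals the number of values.
import Mathlib
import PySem

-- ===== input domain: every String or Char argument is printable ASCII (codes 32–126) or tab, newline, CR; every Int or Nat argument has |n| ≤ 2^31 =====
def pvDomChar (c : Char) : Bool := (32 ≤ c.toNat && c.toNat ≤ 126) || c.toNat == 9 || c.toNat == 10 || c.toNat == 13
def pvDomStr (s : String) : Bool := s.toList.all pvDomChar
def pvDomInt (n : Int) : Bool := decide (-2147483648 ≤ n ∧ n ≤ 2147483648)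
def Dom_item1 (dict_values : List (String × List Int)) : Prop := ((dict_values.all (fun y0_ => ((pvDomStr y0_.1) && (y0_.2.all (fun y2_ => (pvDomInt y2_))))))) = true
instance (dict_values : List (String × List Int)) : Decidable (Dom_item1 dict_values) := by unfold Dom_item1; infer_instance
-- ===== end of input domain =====

-- B replaces A's repeated set-intersections by a single frequency table (count in how many
-- values each element occurs, keep those with count = number of values): 'alternative' objective.

-- ===== PORT A =====
-- result = set(); for i in values: result = set(i); for k in values: result &= set(k); break
def item1 (dict_values : List (String × List Int)) : List Int :=
  match dict_values with
  | [] => PySem.Set.empty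
  | (_, i) :: _ =>
      (dict_values.map Prod.snd).foldl
        (fun result k => PySem.Set.inter result (PySem.Set.ofList k))
        (PySem.Set.ofList i)

-- ===== PORT B =====
-- n = len(dict_values); counts[x] += 1 for each x in set(v) for each value v;
-- return {x for x in counts if counts.get(x, 0) == n}
def item1_alt (dict_values : List (String × List Int)) : List Int :=
  let n := dict_values.length
  if n = 0 then PySem.Set.empty
  else
    let counts : PySem.Dict Int Int :=
      dict_values.foldl
        (fun d p => (PySem.Set.ofList p.2).foldl (fun d x => d.insert x (d.getD x 0 + 1)) d)
        PySem.Dict.empty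
    PySem.Set.ofList (counts.keys.filter (fun x => counts.getD x 0 == (n : Int)))

-- ===== PRECONDITION & SPEC =====
def Spec_item1 (dict_values : List (String × List Int)) (out : List Int) : Prop := out = item1_alt dict_values
instance (dict_values : List (String × List Int)) (out : List Int) : Decidable (Spec_item1 dict_values out) := by unfold Spec_item1; infer_instance

-- ===== CLAIM (what is proved, stated in full; the proofs are below) =====
def Claim_equal_item1 : Prop := ∀ (dict_values : List (String × List Int)), Dom_item1 dict_values → Spec_item1 dict_values (item1 dict_values)

-- ===== LEMMAS AND PROOFS =====

-- A's inner loop is a filter by "contained in every value"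
theorem foldl_inter_eq_filter (vals : List (List Int)) (s : List Int) :
    vals.foldl (fun r k => PySem.Set.inter r (PySem.Set.ofList k)) s
      = s.filter (fun x => vals.all (fun k => k.contains x)) := by
  induction vals generalizing s with
  | nil => simp
  | cons v vs ih =>
      rw [List.foldl_cons, ih]
      simp only [PySem.Set.inter]
      rw [List.filter_filter]
      apply List.filter_congr
      intro x _
      simp [Bool.and_comm]

-- one pass of the counting loop over a duplicate-free list bumps the count of its members by 1
theorem getD_count_pass (s : List Int) (d : PySem.Dict Int Int) (y : Int) (hs : s.Nodup) :
    (s.foldl (fun d x => d.insert x (d.getD x 0 + 1)) d).getD y 0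
      = d.getD y 0 + (if y ∈ s then 1 else 0) := by
  induction s generalizing d with
  | nil => simp
  | cons a t ih =>
      simp only [List.foldl_cons]
      rw [ih _ (hs.of_cons)]
      rw [PySem.Dict.getD_insert]
      by_cases hya : y = a
      · subst hya
        simp [(List.nodup_cons.1 hs).1]
      · simp [hya]

-- the full counter: counts.getD y 0 = number of values containing y
theorem getD_counts (vals : List (String × List Int)) (d : PySem.Dict Int Int) (y : Int) :
    (vals.foldl
        (fun d p => (PySem.Set.ofList p.2).foldl (fun d x => d.insert x (d.getD x 0 + 1)) d)
        d).getD y 0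
      = d.getD y 0 + (vals.countP (fun p => p.2.contains y) : Int) := by
  induction vals generalizing d with
  | nil => simp
  | cons p ps ih =>
      simp only [List.foldl_cons, ih]
      rw [getD_count_pass _ _ _ (PySem.Set.nodup_ofList _)]
      by_cases hy : y ∈ p.2
      · simp [hy, PySem.Set.mem_ofList]
        ring
      · simp [hy, PySem.Set.mem_ofList]

-- the counter's key list is the running set-union of the (deduplicated) values
theorem keys_counts (vals : List (String × List Int)) (d : PySem.Dict Int Int) :
    (vals.foldl
        (fun d p => (PySem.Set.ofList p.2).foldl (fun d x => d.insert x (d.getD x 0 + 1)) d)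
        d).keys
      = vals.foldl (fun s p => PySem.Set.update s (PySem.Set.ofList p.2)) d.keys := by
  induction vals generalizing d with
  | nil => rfl
  | cons p ps ih =>
      simp only [List.foldl_cons, ih, PySem.Dict.keys_foldl_insert]

theorem mem_update_of_mem (s xs : List Int) (y : Int) (h : y ∈ s) :
    y ∈ PySem.Set.update s xs := by
  induction xs generalizing s with
  | nil => exact h
  | cons a t ih => exact ih _ ((PySem.Set.mem_add s a y).2 (Or.inl h))

-- updating with further sets adds no element satisfying P when P-elements already lie in s
theorem filter_update (P : Int → Bool) (xs s : List Int) (h : ∀ x, P x = true → x ∈ s) :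
    (PySem.Set.update s xs).filter P = s.filter P := by
  induction xs generalizing s with
  | nil => rfl
  | cons a t ih =>
      show (PySem.Set.update (PySem.Set.add s a) t).filter P = s.filter P
      rw [ih (PySem.Set.add s a) (fun x hx => (PySem.Set.mem_add s a x).2 (Or.inl (h x hx)))]
      unfold PySem.Set.add
      split
      · rfl
      · rename_i hc
        have hPa : P a = false := by
          cases hPa : P a with
          | false => rfl
          | true => exact absurd (by simpa [List.contains_iff_mem] using h a hPa) (by simpa using hc)
        simp [List.filter_append, hPa]

theorem filter_foldl_update (P : Int → Bool) (vss : List (String × List Int)) (s : List Int)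
    (h : ∀ x, P x = true → x ∈ s) :
    (vss.foldl (fun s p => PySem.Set.update s (PySem.Set.ofList p.2)) s).filter P
      = s.filter P := by
  induction vss generalizing s with
  | nil => rfl
  | cons p ps ih =>
      simp only [List.foldl_cons]
      rw [ih _ (fun x hx => mem_update_of_mem _ _ _ (h x hx)), filter_update P _ s h]

-- "count = number of values" is exactly "contained in every value"
theorem count_eq_all (vals : List (String × List Int)) (x : Int) :
    ((vals.countP (fun p => p.2.contains x) : Int) == (vals.length : Int))
      = vals.all (fun p => p.2.contains x) := by
  cases hall : vals.all (fun p => p.2.contains x) with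
  | true =>
      have hc : vals.countP (fun p => p.2.contains x) = vals.length :=
        List.countP_eq_length.2 (List.all_eq_true.1 hall)
      rw [hc]
      exact beq_self_eq_true _
  | false =>
      have hne : vals.countP (fun p => p.2.contains x) ≠ vals.length := by
        intro hEq
        obtain ⟨p, hp, hfail⟩ := List.all_eq_false.mp hall
        exact hfail (List.countP_eq_length.1 hEq p hp)
      simp only [beq_eq_false_iff_ne, ne_eq, Nat.cast_inj]
      exact hne

-- ===== VERDICT (by name: the statement is the Claim_ definition above) =====
theorem item1_spec : Claim_equal_item1 := by
  intro dict_values _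
  show item1 dict_values = item1_alt dict_values
  match dict_values with
  | [] => rfl
  | (name, i) :: rest =>
      unfold item1 item1_alt
      simp only [List.length_cons, Nat.succ_ne_zero]
      rw [foldl_inter_eq_filter]
      rw [keys_counts]
      set vals := (name, i) :: rest with hvals
      have hgetD : ∀ y, (vals.foldl
          (fun d p => (PySem.Set.ofList p.2).foldl (fun d x => d.insert x (d.getD x 0 + 1)) d)
          PySem.Dict.empty).getD y 0 = (vals.countP (fun p => p.2.contains y) : Int) := by
        intro y; rw [getD_counts]; simp [PySem.Dict.getD, PySem.Dict.empty, PySem.Dict.get?]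
      have hP : ∀ y, ((vals.foldl
          (fun d p => (PySem.Set.ofList p.2).foldl (fun d x => d.insert x (d.getD x 0 + 1)) d)
          PySem.Dict.empty).getD y 0 == ((rest.length + 1 : Nat) : Int))
            = vals.all (fun p => p.2.contains y) := by
        intro y; rw [hgetD, ← count_eq_all vals y]; simp [hvals]
      -- rewrite B's filter predicate to A's
      rw [List.filter_congr (fun y _ => hP y)]
      -- B's key fold starts from empty keys: first step is Set.ofList i ( deduplicated )
      have hkeys0 : (PySem.Dict.empty : PySem.Dict Int Int).keys = ([] : List Int) := rfl
      rw [hkeys0, hvals]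
      simp only [List.foldl_cons, List.map_cons]
      have hfirst : PySem.Set.update ([] : List Int) (PySem.Set.ofList i) = PySem.Set.ofList i :=
        PySem.Set.ofList_eq_self_of_nodup _ (PySem.Set.nodup_ofList i)
      rw [hfirst]
      rw [filter_foldl_update _ rest (PySem.Set.ofList i)
        (fun x hx => by
          have hxi := (List.all_eq_true.1 hx) (name, i) (List.mem_cons_self)
          exact (PySem.Set.mem_ofList i x).2 (by simpa [List.contains_iff_mem] using hxi))]
      rw [PySem.Set.ofList_eq_self_of_nodup _ ((PySem.Set.nodup_ofList i).filter _)]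
      apply List.filter_congr
      intro x _
      simp [Function.comp_def]
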